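-- pv_equiv track=rewrite | github.com/YolandaJ/Big-Data-Machine-Learning | decisionTree/myID3.py | calCounts
-- ===== SOURCE A (Python) =====
-- def calCounts(data):
--     if (not data or len(data) == 0):
--         return [[0,0,0,0]]
--     nrow = len(data)
--     ncol = len(data[0])
--     # get the number of (x,y), x is the attribute value, y is label, represent the number of (T,T),(T,F),(F,T),(F,F)
--     counts = [[0,0,0,0] for i in range(ncol)]
--
--     for col in range(ncol):
--         for row in range(nrow):
--             val = data[row][col]
--             if (val == '1'):
--                 if(data[row][-1] == '1'): counts[col][0] += 1
--                 else: counts[col][1] += 1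
--             else:
--                 if(data[row][-1] == '1'): counts[col][2] += 1
--                 else: counts[col][3] += 1
--     return counts
-- ===== SOURCE B (Python) =====
-- def calCounts(data):
--     if not data:
--         return [[0, 0, 0, 0]]
--     pairs = [(True, True), (True, False), (False, True), (False, False)]
--     return [[sum(1 for row in data if (row[c] == '1') == v and (row[-1] == '1') == l)
--              for v, l in pairs]
--             for c in range(len(data[0]))]
-- ===== Notes on version B (the rewrite author's own statement) =====
-- stated objective: simpler
-- what changed: Replaces A's column-major double loop that increments slots of a pre-allocated counts matrix with a direct per-cell closed-form count: each of the 4 slots of each column is computed independently as the number of rows matching that (value=='1', label=='1') pair.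
import Mathlib
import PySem

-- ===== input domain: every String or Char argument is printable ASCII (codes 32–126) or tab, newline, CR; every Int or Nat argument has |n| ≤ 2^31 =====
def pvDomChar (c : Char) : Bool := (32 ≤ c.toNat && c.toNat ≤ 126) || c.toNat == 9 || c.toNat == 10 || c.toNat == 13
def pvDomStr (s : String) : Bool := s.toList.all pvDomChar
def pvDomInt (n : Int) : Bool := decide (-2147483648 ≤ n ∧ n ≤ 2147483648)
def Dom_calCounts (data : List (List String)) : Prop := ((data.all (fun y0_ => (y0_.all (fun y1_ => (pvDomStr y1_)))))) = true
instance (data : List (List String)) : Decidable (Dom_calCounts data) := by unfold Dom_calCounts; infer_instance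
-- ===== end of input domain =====

-- B replaces A's column-major slot-incrementing counts matrix by a direct per-cell count
-- (each of the 4 slots of each column counted independently); objective: simpler.

-- ===== PORT A =====
-- slot index chosen by A's branch tree (val == '1' / data[row][-1] == '1')
def pvSlotA (val lab : String) : Nat :=
  if val = "1" then (if lab = "1" then 0 else 1) else (if lab = "1" then 2 else 3)

def calCounts (data : List (List String)) : List (List Int) :=
  if data.isEmpty then [[0, 0, 0, 0]] else
  let nrow := data.length
  let ncol := (data.getD 0 []).length
  let init : List (List Int) := (List.range ncol).map (fun _ => [0, 0, 0, 0])
  (List.range ncol).foldl (fun counts col =>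
    (List.range nrow).foldl (fun counts row =>
      -- data[row][col] and data[row][-1]: getD / getLast? are exact here since
      -- Pre_ guarantees every row has length ≥ ncol (and is nonempty when ncol > 0)
      let r := data.getD row []
      let val := r.getD col ""
      let lab := r.getLast?.getD ""
      counts.modify col (fun c => c.modify (pvSlotA val lab) (· + 1))) counts) init

-- ===== PORT B =====
def calCounts_alt (data : List (List String)) : List (List Int) :=
  if data.isEmpty then [[0, 0, 0, 0]] else
  let pairs : List (Bool × Bool) := [(true, true), (true, false), (false, true), (false, false)]
  (List.range (data.getD 0 []).length).map (fun c =>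
    pairs.map (fun p =>
      -- sum(1 for row in data if (row[c]=='1')==v and (row[-1]=='1')==l), as filter+length
      ((data.filter (fun row =>
        decide (row.getD c "" = "1") = p.1 && decide (row.getLast?.getD "" = "1") = p.2)).length : Int)))

-- ===== PRECONDITION & SPEC =====
-- A raises IndexError when some row is shorter than the first row (data[row][col] /
-- data[row][-1] out of range); Pre_ excludes exactly those inputs.
def Pre_calCounts (data : List (List String)) : Prop :=
  ∀ r ∈ data, (data.getD 0 []).length ≤ r.length
instance (data : List (List String)) : Decidable (Pre_calCounts data) := by
  unfold Pre_calCounts; infer_instance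
def pvWitness_calCounts : List (List String) := [["1", "0"], ["0", "0"], ["1", "1"]]

def Spec_calCounts (data : List (List String)) (out : List (List Int)) : Prop := out = calCounts_alt data
instance (data : List (List String)) (out : List (List Int)) : Decidable (Spec_calCounts data out) := by unfold Spec_calCounts; infer_instance

-- ===== CLAIM (what is proved, stated in full; the proofs are below) =====
def Claim_equal_calCounts : Prop := ∀ (data : List (List String)), Dom_calCounts data → Pre_calCounts data → Spec_calCounts data (calCounts data)

-- ===== LEMMAS AND PROOFS =====

-- fold over row indices with getD = fold over the list itself
theorem pv_foldl_range_getD {α β : Type} (l : List α) (d : α) (h : β → α → β) (s : β) :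
    (List.range l.length).foldl (fun s i => h s (l.getD i d)) s = l.foldl h s := by
  induction l generalizing s with
  | nil => rfl
  | cons a t ih =>
    simp only [List.length_cons, List.range_succ_eq_map, List.foldl_cons, List.foldl_map,
      List.getD_cons_zero, List.getD_cons_succ]
    exact ih _

-- a fold that always modifies position i equals one modify by the folded function
theorem pv_foldl_modify {α γ : Type} (rows : List γ) (i : Nat)
    (g : γ → α → α) (l : List α) :
    rows.foldl (fun acc r => acc.modify i (g r)) l
      = l.modify i (fun x => rows.foldl (fun x r => g r x) x) := by
  induction rows generalizing l with
  | nil => exact (List.modify_id _ _).symm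
  | cons r t ih => rw [List.foldl_cons, ih, List.modify_modify_eq]; rfl

theorem pv_foldl_modify_succ {α : Type} (idxs : List Nat) (a : α) (acc : List α)
    (F : Nat → α → α) :
    (idxs.map Nat.succ).foldl (fun acc i => acc.modify i (F i)) (a :: acc)
      = a :: idxs.foldl (fun acc i => acc.modify i (F (i + 1))) acc := by
  induction idxs generalizing acc with
  | nil => rfl
  | cons i t ih =>
    simp only [List.map_cons, List.foldl_cons, List.modify_succ_cons, Nat.succ_eq_add_one]
    exact ih _

-- fold of position-i modifies over range n starting from a constant map
theorem pv_outer (n : Nat) (F : Nat → List Int → List Int) (K : List Int) :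
    (List.range n).foldl (fun acc i => acc.modify i (F i)) ((List.range n).map (fun _ => K))
      = (List.range n).map (fun i => F i K) := by
  induction n generalizing F with
  | zero => rfl
  | succ m ih =>
    simp only [List.range_succ_eq_map, List.map_cons, List.foldl_cons, List.modify_zero_cons,
      List.map_map]
    rw [pv_foldl_modify_succ]
    congr 1
    · have hl : List.map ((fun (_ : Nat) => K) ∘ Nat.succ) (List.range m)
          = (List.range m).map (fun _ => K) := by simp [Function.comp_def]
      have hr : List.map ((fun i => F i K) ∘ Nat.succ) (List.range m)
          = (List.range m).map (fun i => F (i + 1) K) := by simp [Function.comp_def]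
      rw [hl, hr]
      exact ih (fun i => F (i + 1))

-- counting the four slots: the inner fold over rows on a 4-list literal
theorem pv_cell (rows : List (List String)) (c : Nat) (a b d e : Int) :
    rows.foldl (fun x r =>
        x.modify (pvSlotA (r.getD c "") (r.getLast?.getD "")) (· + 1)) [a, b, d, e]
      = [a + ((rows.filter (fun r =>
              decide (r.getD c "" = "1") && decide (r.getLast?.getD "" = "1"))).length : Int),
         b + ((rows.filter (fun r =>
              decide (r.getD c "" = "1") && !decide (r.getLast?.getD "" = "1"))).length : Int),
         d + ((rows.filter (fun r =>
              !decide (r.getD c "" = "1") && decide (r.getLast?.getD "" = "1"))).length : Int),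
         e + ((rows.filter (fun r =>
              !decide (r.getD c "" = "1") && !decide (r.getLast?.getD "" = "1"))).length : Int)] := by
  induction rows generalizing a b d e with
  | nil => simp
  | cons r t ih =>
    rw [List.foldl_cons]
    by_cases h1 : r[c]?.getD "" = "1" <;> by_cases h2 : r.getLast?.getD "" = "1"
    · rw [show pvSlotA (r.getD c "") (r.getLast?.getD "") = 0 from by
        simp [pvSlotA, List.getD, h1, h2]]
      rw [show ([a, b, d, e].modify 0 (· + (1:Int))) = [a + 1, b, d, e] from rfl, ih]
      simp [List.getD, h1, h2]; omega
    · rw [show pvSlotA (r.getD c "") (r.getLast?.getD "") = 1 from by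
        simp [pvSlotA, List.getD, h1, h2]]
      rw [show ([a, b, d, e].modify 1 (· + (1:Int))) = [a, b + 1, d, e] from rfl, ih]
      simp [List.getD, h1, h2]; omega
    · rw [show pvSlotA (r.getD c "") (r.getLast?.getD "") = 2 from by
        simp [pvSlotA, List.getD, h1, h2]]
      rw [show ([a, b, d, e].modify 2 (· + (1:Int))) = [a, b, d + 1, e] from rfl, ih]
      simp [List.getD, h1, h2]; omega
    · rw [show pvSlotA (r.getD c "") (r.getLast?.getD "") = 3 from by
        simp [pvSlotA, List.getD, h1, h2]]
      rw [show ([a, b, d, e].modify 3 (· + (1:Int))) = [a, b, d, e + 1] from rfl, ih]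
      simp [List.getD, h1, h2]; omega

-- ===== VERDICT (by name: the statement is the Claim_ definition above) =====
theorem calCounts_spec : Claim_equal_calCounts := by
  intro data _ _
  unfold Spec_calCounts calCounts calCounts_alt
  by_cases hne : data.isEmpty
  · simp [hne]
  · simp only [hne]
    have hinner : (fun (counts : List (List Int)) (col : Nat) =>
        (List.range data.length).foldl (fun counts row =>
          counts.modify col (fun c =>
            c.modify (pvSlotA ((data.getD row []).getD col "")
              ((data.getD row []).getLast?.getD "")) (· + 1))) counts)
      = (fun counts col => counts.modify col (fun x =>
          data.foldl (fun x r =>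
            x.modify (pvSlotA (r.getD col "") (r.getLast?.getD "")) (· + 1)) x)) := by
      funext counts col
      rw [pv_foldl_range_getD data [] (fun counts r =>
        counts.modify col (fun c =>
          c.modify (pvSlotA (r.getD col "") (r.getLast?.getD "")) (· + 1))) counts]
      exact pv_foldl_modify data col _ counts
    rw [hinner, pv_outer]
    apply List.map_congr_left
    intro c _
    rw [pv_cell]
    simp
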